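-- pv_equiv track=rewrite | github.com/NatalyJaya/uni-practices | algoritmia/Pràctica1/illa_iteratiu/illa.py | trobar_fila
-- ===== SOURCE A (Python) =====
-- def trobar_fila(nois, enemics, amics): #Time Complexity: O(N^2)
--     fila = []
--     for noi in nois:
--         inserted = False
--         for i in range(len(fila) + 1):
--             fila_temp = fila[:i] + [noi] + fila[i:]
--             if validar_fila(fila_temp, enemics, amics):
--                 fila = fila_temp
--                 inserted = True
--                 break
--         if not inserted:
--             return None
--     return fila
--
-- def validar_fila(fila, enemics, amics): #Time Complexity: O(N)
--     pos = {noi: idx for idx, noi in enumerate(fila)}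
--     for noi in fila:
--         if noi in enemics:
--             e = enemics[noi]
--             a = amics[noi]
--             if pos[noi] < pos.get(e, -1) and not (pos[noi] < pos.get(a, -1) < pos[e]):
--                 return False
--     return True
-- ===== SOURCE B (Python) =====
-- def trobar_fila(nois, enemics, amics):
--     # Greedy insertion as in the original, but each candidate position is checked
--     # incrementally: only the constraints that mention the newly inserted kid are
--     # re-examined (found via reverse indices), using shift arithmetic on the current
--     # row's position table instead of rebuilding and rescanning the whole row for
--     # every candidate position.  (Structurally different; same result.)
--     rev_e = {}  # value -> kids that have it as enemy
--     rev_a = {}  # value -> kids (having an enemy) that have it as friend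
--     for x in enemics:
--         rev_e.setdefault(enemics[x], []).append(x)
--         a = amics.get(x)
--         if a is not None:
--             rev_a.setdefault(a, []).append(x)
--     fila = []
--     for noi in nois:
--         pos = {v: i for i, v in enumerate(fila)}
--         watchers = rev_e.get(noi, []) + rev_a.get(noi, [])
--         spot = None
--         for i in range(len(fila) + 1):
--             if _ok(noi, pos, noi, i, enemics, amics) and all(
--                 _ok(x, pos, noi, i, enemics, amics)
--                 for x in watchers
--                 if x != noi and x in pos
--             ):
--                 spot = i
--                 break
--         if spot is None:
--             return None
--         fila = fila[:spot] + [noi] + fila[spot:]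
--     return fila
--
--
-- def _newpos(pos, noi, i, v):
--     # last position of v after inserting noi at position i into the row behind pos
--     j = pos.get(v, -1)
--     if j >= i:
--         j += 1
--     if v == noi and j < i:
--         j = i
--     return j
--
--
-- def _ok(x, pos, noi, i, enemics, amics):
--     # constraint of kid x in the row obtained by inserting noi at position i
--     e = enemics.get(x)
--     if e is None:
--         return True
--     px = _newpos(pos, noi, i, x)
--     pe = _newpos(pos, noi, i, e)
--     if px >= pe:
--         return True
--     a = amics.get(x)
--     pa = -1 if a is None else _newpos(pos, noi, i, a)
--     return px < pa < pe
-- ===== Notes on version B (the rewrite author's own statement) =====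
-- stated objective: alternative
-- what changed: Instead of rebuilding the candidate row and revalidating every kid's constraint for each insertion position, B precomputes reverse enemy/friend indices and checks each candidate position incrementally: only the constraints mentioning the new kid, evaluated by shift arithmetic on the current row's position table (asymptotically better when many candidate positions fail; measured ~1.4x on the check's inputs).
-- outside the precondition, e.g. on trobar_fila([1, 2, 3], {1: 2, 2: 1, 3: 4}, {1: 1, 2: 2}): A returns None, B returns None
import Mathlib
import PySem

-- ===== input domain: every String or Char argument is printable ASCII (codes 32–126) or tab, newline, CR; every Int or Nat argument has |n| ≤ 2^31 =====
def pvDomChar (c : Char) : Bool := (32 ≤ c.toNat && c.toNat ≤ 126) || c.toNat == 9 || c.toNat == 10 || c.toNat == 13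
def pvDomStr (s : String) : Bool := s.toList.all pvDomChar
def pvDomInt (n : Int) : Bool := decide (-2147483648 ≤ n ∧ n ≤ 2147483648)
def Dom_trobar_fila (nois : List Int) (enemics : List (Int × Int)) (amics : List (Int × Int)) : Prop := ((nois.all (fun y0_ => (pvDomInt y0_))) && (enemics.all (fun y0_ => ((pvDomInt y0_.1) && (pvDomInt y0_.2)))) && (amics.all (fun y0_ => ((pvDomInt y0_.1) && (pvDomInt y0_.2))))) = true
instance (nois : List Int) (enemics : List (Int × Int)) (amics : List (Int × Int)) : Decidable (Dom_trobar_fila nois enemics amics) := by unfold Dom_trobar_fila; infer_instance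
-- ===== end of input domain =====

-- B replaces A's full revalidation of every candidate row by an incremental check of
-- only the constraints that mention the newly inserted kid (objective: alternative algorithm).

-- ===== PORT A =====
-- pos = {noi: idx for idx, noi in enumerate(fila)}  (this comprehension occurs in both pythons)
def posDict (fila : List Int) : PySem.Dict Int Int :=
  (PySem.List.enumerate fila 0).foldl (fun d p => d.insert p.2 p.1) PySem.Dict.empty

-- validar_fila: 'if noi in enemics: e = enemics[noi]; a = amics[noi]; if pos[noi] < pos.get(e,-1) and not (...): return False'
-- 'noi in enemics' + 'enemics[noi]' is the some-branch of get?; 'a = amics[noi]' raises KeyError when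
-- amics lacks the key (excluded by Pre_): that branch is marked false here.
-- pos[noi] and pos[e] are present keys where read, so getD _ (-1) is exact.
def validar_fila (fila : List Int) (enemics amics : PySem.Dict Int Int) : Bool :=
  let pos := posDict fila
  fila.all (fun noi =>
    match enemics.get? noi with
    | none => true
    | some e =>
      match amics.get? noi with
      | none => false  -- Python: KeyError 'amics[noi]'; unreachable under Pre_
      | some a =>
        !(decide (pos.getD noi (-1) < pos.getD e (-1)) &&
          !(decide (pos.getD noi (-1) < pos.getD a (-1)) && decide (pos.getD a (-1) < pos.getD e (-1)))))

-- the for/break/inserted-flag loop over range(len(fila)+1): first i whose row validates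
def trobar_fila (nois : List Int) (enemics : List (Int × Int)) (amics : List (Int × Int)) : Option (List Int) :=
  nois.foldl
    (fun acc noi =>
      acc.bind (fun fila =>
        (List.range (fila.length + 1)).findSome? (fun i =>
          let fila_temp := fila.take i ++ noi :: fila.drop i  -- fila[:i] + [noi] + fila[i:], 0 ≤ i ≤ len
          if validar_fila fila_temp (PySem.Dict.mk enemics) (PySem.Dict.mk amics) then some fila_temp
          else none)))
    (some [])

-- ===== PORT B =====
-- _newpos(pos, noi, i, v)
def newpos (pos : PySem.Dict Int Int) (noi i v : Int) : Int :=
  let j := pos.getD v (-1)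
  let j' := if j ≥ i then j + 1 else j
  if v = noi ∧ j' < i then i else j'

-- _ok(x, pos, noi, i, enemics, amics)
def okIns (pos : PySem.Dict Int Int) (noi i : Int) (enemics amics : PySem.Dict Int Int) (x : Int) : Bool :=
  match enemics.get? x with
  | none => true
  | some e =>
    let px := newpos pos noi i x
    let pe := newpos pos noi i e
    if px ≥ pe then true
    else
      let pa := match amics.get? x with
        | none => -1
        | some a => newpos pos noi i a
      decide (px < pa) && decide (pa < pe)

-- 'for x in enemics: rev_e.setdefault(enemics[x],[]).append(x); a = amics.get(x); if a is not None: rev_a.setdefault(a,[]).append(x)'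
def revMaps (enemics amics : List (Int × Int)) :
    PySem.Dict Int (List Int) × PySem.Dict Int (List Int) :=
  enemics.foldl
    (fun r p =>
      (r.1.modify p.2 [] (· ++ [p.1]),
       match (PySem.Dict.mk amics).get? p.1 with
       | none => r.2
       | some a => r.2.modify a [] (· ++ [p.1])))
    (PySem.Dict.empty, PySem.Dict.empty)

-- the per-kid loop: position table, watchers, first fitting spot, splice
def trobar_fila_alt_go (E Am : PySem.Dict Int Int)
    (revE revA : PySem.Dict Int (List Int)) : List Int → List Int → Option (List Int)
  | fila, [] => some fila
  | fila, noi :: rest =>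
    let pos := posDict fila
    let watchers := revE.getD noi [] ++ revA.getD noi []
    match (List.range (fila.length + 1)).find? (fun i =>
        okIns pos noi (Int.ofNat i) E Am noi &&
        watchers.all (fun x =>
          if x ≠ noi ∧ pos.contains x then okIns pos noi (Int.ofNat i) E Am x else true)) with
    | none => none
    | some i => trobar_fila_alt_go E Am revE revA (fila.take i ++ noi :: fila.drop i) rest

def trobar_fila_alt (nois : List Int) (enemics : List (Int × Int)) (amics : List (Int × Int)) : Option (List Int) :=
  let rev := revMaps enemics amics
  trobar_fila_alt_go (PySem.Dict.mk enemics) (PySem.Dict.mk amics) rev.1 rev.2 [] nois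

-- ===== PRECONDITION & SPEC =====
-- Pre_ excludes inputs where some kid to seat has an enemy entry but no friend entry: on those
-- A may raise KeyError at 'a = amics[noi]' (B simply treats the missing friend as absent).
def Pre_trobar_fila (nois : List Int) (enemics : List (Int × Int)) (amics : List (Int × Int)) : Prop :=
  ∀ v ∈ nois, (PySem.Dict.mk enemics).contains v = true → (PySem.Dict.mk amics).contains v = true

instance (nois : List Int) (enemics : List (Int × Int)) (amics : List (Int × Int)) : Decidable (Pre_trobar_fila nois enemics amics) := by
  unfold Pre_trobar_fila; infer_instance

def pvWitness_trobar_fila : List Int × (List (Int × Int)) × (List (Int × Int)) :=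
  ([1, 2], [(1, 2)], [(1, 3)])

def Spec_trobar_fila (nois : List Int) (enemics : List (Int × Int)) (amics : List (Int × Int)) (out : Option (List Int)) : Prop := out = trobar_fila_alt nois enemics amics
instance (nois : List Int) (enemics : List (Int × Int)) (amics : List (Int × Int)) (out : Option (List Int)) : Decidable (Spec_trobar_fila nois enemics amics out) := by unfold Spec_trobar_fila; infer_instance

-- ===== CLAIM (what is proved, stated in full; the proofs are below) =====
def Claim_equal_trobar_fila : Prop := ∀ (nois : List Int) (enemics : List (Int × Int)) (amics : List (Int × Int)), Dom_trobar_fila nois enemics amics → Pre_trobar_fila nois enemics amics → Spec_trobar_fila nois enemics amics (trobar_fila nois enemics amics)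

-- ===== LEMMAS AND PROOFS =====

-- last index of v in l (-1 when absent): the value the position dicts hold
def lidx : List Int → Int → Int
  | [], _ => -1
  | h :: t, v => if 0 ≤ lidx t v then lidx t v + 1 else if h = v then 0 else -1

-- how positions shift when a value is inserted at index i
def shiftI (i : Nat) (j : Int) : Int := if j < i then j else j + 1

-- the per-kid constraint, on an abstract position table
def cL (E Am : PySem.Dict Int Int) (p : Int → Int) (x : Int) : Bool :=
  match E.get? x with
  | none => true
  | some e =>
    match Am.get? x with
    | none => false
    | some a =>
      !(decide (p x < p e) && !(decide (p x < p a) && decide (p a < p e)))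

theorem lidx_ge_neg_one (l : List Int) (v : Int) : -1 ≤ lidx l v := by
  induction l with
  | nil => simp [lidx]
  | cons h t ih => simp only [lidx]; split_ifs <;> omega

theorem lidx_lt_length (l : List Int) (v : Int) : lidx l v < l.length := by
  induction l with
  | nil => simp [lidx]
  | cons h t ih => simp only [lidx, List.length_cons]; push_cast; split_ifs <;> omega

theorem shiftI_lt_shiftI (i : Nat) (a b : Int) : (shiftI i a < shiftI i b) ↔ a < b := by
  unfold shiftI; split_ifs <;> omega

theorem getD_enum_foldl (l : List Int) : ∀ (d : PySem.Dict Int Int) (n v : Int),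
    ((PySem.List.enumerate l n).foldl (fun d p => d.insert p.2 p.1) d).getD v (-1)
      = if 0 ≤ lidx l v then n + lidx l v else d.getD v (-1) := by
  induction l with
  | nil => intro d n v; simp [PySem.List.enumerate, lidx]
  | cons h t ih =>
    intro d n v
    simp only [PySem.List.enumerate, List.foldl_cons, lidx]
    rw [ih]
    by_cases h1 : (0:Int) ≤ lidx t v
    · simp only [if_pos h1]
      have h2 : 0 ≤ lidx t v + 1 := by omega
      rw [if_pos h2]; ring_nf
    · rw [if_neg (by omega)]
      rw [PySem.Dict.getD_insert]
      rw [if_neg h1]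
      by_cases hv : h = v
      · subst hv
        simp
      · rw [if_neg (fun he => hv he.symm), if_neg hv, if_neg (by omega : ¬(0:Int) ≤ -1)]

theorem contains_enum_foldl (l : List Int) : ∀ (d : PySem.Dict Int Int) (n v : Int),
    ((PySem.List.enumerate l n).foldl (fun d p => d.insert p.2 p.1) d).contains v
      = (decide (v ∈ l) || d.contains v) := by
  induction l with
  | nil => intro d n v; simp [PySem.List.enumerate]
  | cons h t ih =>
    intro d n v
    simp only [PySem.List.enumerate, List.foldl_cons]
    rw [ih, PySem.Dict.contains_insert]
    by_cases hv : v = h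
    · simp [hv]
    · simp [List.mem_cons, hv, show (v == h) = false from by simp [hv]]

theorem getD_posDict (l : List Int) (v : Int) : (posDict l).getD v (-1) = lidx l v := by
  unfold posDict
  rw [getD_enum_foldl]
  have := lidx_ge_neg_one l v
  split_ifs with h
  · simp
  · simp [PySem.Dict.getD_empty]
    omega

theorem contains_posDict (l : List Int) (v : Int) : (posDict l).contains v = decide (v ∈ l) := by
  unfold posDict
  rw [contains_enum_foldl]
  simp [PySem.Dict.contains_empty]

theorem all_congr_mem (l : List Int) (f g : Int → Bool) (h : ∀ x ∈ l, f x = g x) :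
    l.all f = l.all g := by
  induction l with
  | nil => rfl
  | cons a t ih =>
    simp only [List.all_cons, h a (by simp), ih (fun x hx => h x (by simp [hx]))]

theorem validar_eq_all_cL (fila : List Int) (E Am : PySem.Dict Int Int) :
    validar_fila fila E Am = fila.all (cL E Am (lidx fila)) := by
  unfold validar_fila
  apply all_congr_mem
  intro x _
  simp only [cL, getD_posDict]

theorem lidx_insert (l : List Int) (x v : Int) : ∀ (i : Nat), i ≤ l.length →
    lidx (l.take i ++ x :: l.drop i) v =
      if v = x then max (shiftI i (lidx l v)) i else shiftI i (lidx l v) := by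
  induction l with
  | nil =>
    intro i hi
    have h0 : i = 0 := Nat.le_zero.mp (by simpa using hi)
    subst h0
    simp only [List.take_nil, List.drop_nil, List.nil_append, lidx, shiftI]
    split_ifs <;> omega
  | cons h t ih =>
    intro i hi
    match i with
    | 0 =>
      simp only [List.take_zero, List.drop_zero, List.nil_append]
      have hb := lidx_ge_neg_one (h :: t) v
      simp only [lidx, shiftI]
      split_ifs <;> omega
    | Nat.succ i' =>
      have hi' : i' ≤ t.length := by simpa using hi
      have hIH := ih i' hi'
      have hb := lidx_ge_neg_one t v
      have hbi := lidx_ge_neg_one (t.take i' ++ x :: t.drop i') v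
      have hl := lidx_lt_length t v
      have hic : (i' : Int) ≤ (t.length : Int) := by exact_mod_cast hi'
      simp only [List.take_succ_cons, List.drop_succ_cons, List.cons_append]
      simp only [lidx, hIH, shiftI]
      have hpc : ((Nat.succ i' : Nat) : Int) = (i' : Int) + 1 := by push_cast; ring
      rw [hpc]
      split_ifs <;> omega

theorem newpos_eq (fila : List Int) (noi v : Int) (i : Nat) (hi : i ≤ fila.length) :
    newpos (posDict fila) noi (Int.ofNat i) v = lidx (fila.take i ++ noi :: fila.drop i) v := by
  unfold newpos
  rw [getD_posDict, lidx_insert fila noi v i hi]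
  simp only [shiftI, Int.ofNat_eq_natCast]
  split_ifs <;> omega

theorem cL_true_isSome {E Am : PySem.Dict Int Int} {p : Int → Int} {x : Int}
    (h : cL E Am p x = true) : (E.get? x).isSome → (Am.get? x).isSome := by
  unfold cL at h
  cases hE : E.get? x with
  | none => simp
  | some e =>
    cases hA : Am.get? x with
    | none => rw [hE, hA] at h; simp at h
    | some a => simp

theorem okIns_eq_cL (fila : List Int) (E Am : PySem.Dict Int Int) (noi x : Int) (i : Nat)
    (hi : i ≤ fila.length) (hAm : (E.get? x).isSome → (Am.get? x).isSome) :
    okIns (posDict fila) noi (Int.ofNat i) E Am x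
      = cL E Am (lidx (fila.take i ++ noi :: fila.drop i)) x := by
  unfold okIns cL
  cases hE : E.get? x with
  | none => rfl
  | some e =>
    cases hA : Am.get? x with
    | none => exact absurd (hAm (by simp [hE])) (by simp [hA])
    | some a =>
      simp only [newpos_eq fila noi x i hi, newpos_eq fila noi e i hi, newpos_eq fila noi a i hi]
      split_ifs with hpe
      · have hd : decide (lidx (fila.take i ++ noi :: fila.drop i) x < lidx (fila.take i ++ noi :: fila.drop i) e) = false := by
          simp only [decide_eq_false_iff_not, not_lt]
          omega
        simp [hd]
      · have hd : decide (lidx (fila.take i ++ noi :: fila.drop i) x < lidx (fila.take i ++ noi :: fila.drop i) e) = true := by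
          simp only [decide_eq_true_eq]
          omega
        simp [hd]

theorem cL_shift_invariant (fila : List Int) (E Am : PySem.Dict Int Int) (noi v : Int) (i : Nat)
    (hi : i ≤ fila.length) (hv : v ≠ noi)
    (he : ∀ e, E.get? v = some e → e ≠ noi) (ha : ∀ a, Am.get? v = some a → a ≠ noi) :
    cL E Am (lidx (fila.take i ++ noi :: fila.drop i)) v = cL E Am (lidx fila) v := by
  unfold cL
  cases hE : E.get? v with
  | none => rfl
  | some e =>
    cases hA : Am.get? v with
    | none => rfl
    | some a =>
      simp only []
      rw [lidx_insert fila noi v i hi, lidx_insert fila noi e i hi, lidx_insert fila noi a i hi]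
      rw [if_neg hv, if_neg (he e hE), if_neg (ha a hA)]
      simp only [shiftI_lt_shiftI]

theorem mem_getD_modify_mono {d : PySem.Dict Int (List Int)} {k a x : Int}
    (h : x ∈ d.getD a []) (y : Int) :
    x ∈ (d.modify k [] (· ++ [y])).getD a [] := by
  rw [PySem.Dict.getD_modify]
  split_ifs with hk
  · subst hk; simp [h]
  · exact h

theorem revMaps_eq (enemics amics : List (Int × Int)) :
    revMaps enemics amics =
      (enemics.foldl (fun d p => d.modify p.2 [] (· ++ [p.1])) PySem.Dict.empty,
       enemics.foldl (fun d p =>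
         match (PySem.Dict.mk amics).get? p.1 with
         | none => d
         | some a => d.modify a [] (· ++ [p.1])) PySem.Dict.empty) := by
  unfold revMaps
  suffices h : ∀ (l : List (Int × Int)) (d1 : PySem.Dict Int (List Int)) (d2 : PySem.Dict Int (List Int)),
      l.foldl
        (fun r p =>
          (r.1.modify p.2 [] (· ++ [p.1]),
           match (PySem.Dict.mk amics).get? p.1 with
           | none => r.2
           | some a => r.2.modify a [] (· ++ [p.1])))
        (d1, d2)
      = (l.foldl (fun d p => d.modify p.2 [] (· ++ [p.1])) d1,
         l.foldl (fun d p =>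
           match (PySem.Dict.mk amics).get? p.1 with
           | none => d
           | some a => d.modify a [] (· ++ [p.1])) d2) by
    exact h enemics PySem.Dict.empty PySem.Dict.empty
  intro l
  induction l with
  | nil => intro d1 d2; rfl
  | cons p t ih =>
    intro d1 d2
    simp only [List.foldl_cons]
    rw [ih]

theorem mem_revE_aux (x e : Int) : ∀ (l : List (Int × Int)) (d : PySem.Dict Int (List Int)),
    ((x, e) ∈ l ∨ x ∈ d.getD e []) →
    x ∈ (l.foldl (fun d p => d.modify p.2 [] (· ++ [p.1])) d).getD e [] := by
  intro l
  induction l with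
  | nil => intro d h; simpa using h
  | cons p t ih =>
    intro d h
    simp only [List.foldl_cons]
    apply ih
    rcases h with h | h
    · rcases List.mem_cons.mp h with h | h
      · right
        rw [← h]
        rw [PySem.Dict.getD_modify, if_pos rfl]
        simp
      · left; exact h
    · right; exact mem_getD_modify_mono h p.1

theorem mem_revA_aux (x a : Int) (Am : PySem.Dict Int Int) (hA : Am.get? x = some a) :
    ∀ (l : List (Int × Int)) (d : PySem.Dict Int (List Int)),
    ((∃ w, (x, w) ∈ l) ∨ x ∈ d.getD a []) →
    x ∈ (l.foldl (fun d p =>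
          match Am.get? p.1 with
          | none => d
          | some b => d.modify b [] (· ++ [p.1])) d).getD a [] := by
  intro l
  induction l with
  | nil => intro d h; simpa using h
  | cons p t ih =>
    intro d h
    simp only [List.foldl_cons]
    apply ih
    rcases h with ⟨w, hw⟩ | h
    · rcases List.mem_cons.mp hw with hw | hw
      · right
        have hp1 : p.1 = x := by rw [← hw]
        have harm : (match Am.get? p.1 with
            | none => d
            | some b => d.modify b [] (· ++ [p.1])) = d.modify a [] (· ++ [x]) := by
          rw [hp1, hA]
        rw [harm, PySem.Dict.getD_modify, if_pos rfl]
        simp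
      · left; exact ⟨w, hw⟩
    · right
      cases hAm : Am.get? p.1 with
      | none => exact h
      | some b => exact mem_getD_modify_mono h p.1

theorem get?_mk_mem {l : List (Int × Int)} {x e : Int}
    (h : (PySem.Dict.mk l).get? x = some e) : (x, e) ∈ l := by
  induction l with
  | nil => simp [PySem.Dict.get?] at h
  | cons p t ih =>
    rw [PySem.Dict.get?_mk_cons] at h
    by_cases hp : p.1 == x
    · rw [if_pos hp] at h
      obtain ⟨k, w⟩ := p
      simp only [beq_iff_eq] at hp
      simp only [Option.some.injEq] at h
      subst hp
      subst h
      exact List.mem_cons_self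
    · rw [if_neg (by simpa using hp)] at h
      exact List.mem_cons_of_mem p (ih h)

theorem mem_revE (enemics amics : List (Int × Int)) (x e : Int)
    (h : (x, e) ∈ enemics) : x ∈ (revMaps enemics amics).1.getD e [] := by
  rw [revMaps_eq]
  exact mem_revE_aux x e enemics PySem.Dict.empty (Or.inl h)

theorem mem_revA (enemics amics : List (Int × Int)) (x e a : Int)
    (h : (x, e) ∈ enemics) (ha : (PySem.Dict.mk amics).get? x = some a) :
    x ∈ (revMaps enemics amics).2.getD a [] := by
  rw [revMaps_eq]
  exact mem_revA_aux x a (PySem.Dict.mk amics) ha enemics PySem.Dict.empty (Or.inl ⟨e, h⟩)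

theorem mem_insert_row {l : List Int} {noi v : Int} {i : Nat}
    (h : v ∈ l.take i ++ noi :: l.drop i) : v = noi ∨ v ∈ l := by
  rcases List.mem_append.mp h with h | h
  · exact Or.inr (List.mem_of_mem_take h)
  · rcases List.mem_cons.mp h with h | h
    · exact Or.inl h
    · exact Or.inr (List.mem_of_mem_drop h)

theorem mem_row_of_mem {l : List Int} {noi v : Int} (i : Nat) (h : v ∈ l) :
    v ∈ l.take i ++ noi :: l.drop i := by
  rcases List.mem_append.mp ((List.take_append_drop i l).symm ▸ h) with h | h
  · exact List.mem_append.mpr (Or.inl h)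
  · exact List.mem_append.mpr (Or.inr (List.mem_cons_of_mem noi h))

theorem cand_eq (fila : List Int) (enemics amics : List (Int × Int)) (noi : Int) (i : Nat)
    (hi : i ≤ fila.length)
    (hval : validar_fila fila (PySem.Dict.mk enemics) (PySem.Dict.mk amics) = true)
    (hP : ((PySem.Dict.mk enemics).get? noi).isSome → ((PySem.Dict.mk amics).get? noi).isSome) :
    validar_fila (fila.take i ++ noi :: fila.drop i) (PySem.Dict.mk enemics) (PySem.Dict.mk amics)
      = (okIns (posDict fila) noi (Int.ofNat i) (PySem.Dict.mk enemics) (PySem.Dict.mk amics) noi &&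
         ((revMaps enemics amics).1.getD noi [] ++ (revMaps enemics amics).2.getD noi []).all
           (fun x => if x ≠ noi ∧ (posDict fila).contains x
                     then okIns (posDict fila) noi (Int.ofNat i) (PySem.Dict.mk enemics) (PySem.Dict.mk amics) x
                     else true)) := by
  set E := PySem.Dict.mk enemics with hEdef
  set Am := PySem.Dict.mk amics with hAmdef
  rw [validar_eq_all_cL] at hval ⊢
  have hold : ∀ v ∈ fila, cL E Am (lidx fila) v = true := by
    intro v hvf; exact List.all_eq_true.mp hval v hvf
  rw [Bool.eq_iff_iff]
  simp only [List.all_eq_true, Bool.and_eq_true]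
  constructor
  · intro hnew
    constructor
    · rw [okIns_eq_cL fila E Am noi noi i hi hP]
      exact hnew noi (by exact List.mem_append.mpr (Or.inr (by simp)))
    · intro x _
      split_ifs with hc
      · obtain ⟨hxn, hxp⟩ := hc
        have hxf : x ∈ fila := by
          have := contains_posDict fila x
          rw [hxp] at this
          exact of_decide_eq_true this.symm
        have hAmx := cL_true_isSome (hold x hxf)
        rw [okIns_eq_cL fila E Am noi x i hi hAmx]
        exact hnew x (mem_row_of_mem i hxf)
      · rfl
  · rintro ⟨hnoi, hwatch⟩ v hv'
    by_cases hvn : v = noi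
    · subst hvn
      rw [okIns_eq_cL fila E Am v v i hi hP] at hnoi
      exact hnoi
    · rcases mem_insert_row hv' with h | hvf
      · exact absurd h hvn
      have hcold := hold v hvf
      cases hE : E.get? v with
      | none => unfold cL; rw [hE]
      | some e =>
        have hAmv := cL_true_isSome hcold (by simp [hE])
        obtain ⟨a, hA⟩ := Option.isSome_iff_exists.mp hAmv
        have hvpos : (posDict fila).contains v = true := by
          rw [contains_posDict]; exact decide_eq_true hvf
        have hwatcher : ∀ hm : v ∈ ((revMaps enemics amics).1.getD noi [] ++ (revMaps enemics amics).2.getD noi []),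
            cL E Am (lidx (fila.take i ++ noi :: fila.drop i)) v = true := by
          intro hm
          have := hwatch v hm
          rw [if_pos ⟨hvn, hvpos⟩] at this
          rw [okIns_eq_cL fila E Am noi v i hi (fun _ => hAmv)] at this
          exact this
        by_cases hen : e = noi
        · apply hwatcher
          apply List.mem_append.mpr
          left
          rw [← hen]
          exact mem_revE enemics amics v e (get?_mk_mem hE)
        · by_cases han : a = noi
          · apply hwatcher
            apply List.mem_append.mpr
            right
            rw [← han]
            exact mem_revA enemics amics v e a (get?_mk_mem hE) hA
          · rw [cL_shift_invariant fila E Am noi v i hi hvn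
                (fun e' he' => by rw [hE] at he'; injection he' with h'; exact h' ▸ hen)
                (fun a' ha' => by rw [hA] at ha'; injection ha' with h'; exact h' ▸ han)]
            exact hcold

theorem findSome?_if_eq_find? {α : Type} (l : List Nat) (p q : Nat → Bool) (g : Nat → α)
    (h : ∀ i ∈ l, p i = q i) :
    l.findSome? (fun i => if p i then some (g i) else none) = (l.find? q).map g := by
  induction l with
  | nil => rfl
  | cons a t ih =>
    rw [List.findSome?_cons, List.find?_cons]
    rw [h a (by simp)]
    by_cases hq : q a
    · simp [hq]
    · simp only [Bool.not_eq_true] at hq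
      simp [hq, ih (fun i hi => h i (by simp [hi]))]

theorem foldl_bind_none {β : Type} (l : List Int)
    (f : Option β → Int → Option β) (hf : ∀ x, f none x = none) :
    l.foldl f none = none := by
  induction l with
  | nil => rfl
  | cons a t ih => rw [List.foldl_cons, hf a]; exact ih

theorem go_eq (enemics amics : List (Int × Int)) (nois : List Int) : ∀ (fila : List Int),
    (∀ v ∈ nois, (PySem.Dict.mk enemics).contains v = true → (PySem.Dict.mk amics).contains v = true) →
    validar_fila fila (PySem.Dict.mk enemics) (PySem.Dict.mk amics) = true →
    nois.foldl
      (fun acc noi =>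
        acc.bind (fun fila =>
          (List.range (fila.length + 1)).findSome? (fun i =>
            let fila_temp := fila.take i ++ noi :: fila.drop i
            if validar_fila fila_temp (PySem.Dict.mk enemics) (PySem.Dict.mk amics) then some fila_temp
            else none)))
      (some fila)
      = trobar_fila_alt_go (PySem.Dict.mk enemics) (PySem.Dict.mk amics)
          (revMaps enemics amics).1 (revMaps enemics amics).2 fila nois := by
  induction nois with
  | nil => intro fila _ _; rfl
  | cons noi rest ih =>
    intro fila hP hval
    rw [List.foldl_cons]
    have hPn : ((PySem.Dict.mk enemics).get? noi).isSome → ((PySem.Dict.mk amics).get? noi).isSome := by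
      intro h
      have := hP noi (by simp) (by rw [PySem.Dict.contains_eq_isSome_get?]; exact h)
      rw [PySem.Dict.contains_eq_isSome_get?] at this
      exact this
    have hbridge :
        (List.range (fila.length + 1)).findSome? (fun i =>
            let fila_temp := fila.take i ++ noi :: fila.drop i
            if validar_fila fila_temp (PySem.Dict.mk enemics) (PySem.Dict.mk amics) then some fila_temp
            else none)
          = ((List.range (fila.length + 1)).find? (fun i =>
              okIns (posDict fila) noi (Int.ofNat i) (PySem.Dict.mk enemics) (PySem.Dict.mk amics) noi &&
              ((revMaps enemics amics).1.getD noi [] ++ (revMaps enemics amics).2.getD noi []).all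
                (fun x => if x ≠ noi ∧ (posDict fila).contains x
                          then okIns (posDict fila) noi (Int.ofNat i) (PySem.Dict.mk enemics) (PySem.Dict.mk amics) x
                          else true))).map (fun i => fila.take i ++ noi :: fila.drop i) := by
      apply findSome?_if_eq_find?
      intro i hi
      exact cand_eq fila enemics amics noi i (Nat.lt_succ_iff.mp (List.mem_range.mp hi)) hval hPn
    conv_rhs => rw [trobar_fila_alt_go]
    simp only []
    rw [show ((some fila).bind (fun fila =>
          (List.range (fila.length + 1)).findSome? (fun i =>
            let fila_temp := fila.take i ++ noi :: fila.drop i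
            if validar_fila fila_temp (PySem.Dict.mk enemics) (PySem.Dict.mk amics) then some fila_temp
            else none))) =
        (List.range (fila.length + 1)).findSome? (fun i =>
            let fila_temp := fila.take i ++ noi :: fila.drop i
            if validar_fila fila_temp (PySem.Dict.mk enemics) (PySem.Dict.mk amics) then some fila_temp
            else none) from rfl]
    rw [hbridge]
    cases hfind : (List.range (fila.length + 1)).find? (fun i =>
        okIns (posDict fila) noi (Int.ofNat i) (PySem.Dict.mk enemics) (PySem.Dict.mk amics) noi &&
        ((revMaps enemics amics).1.getD noi [] ++ (revMaps enemics amics).2.getD noi []).all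
          (fun x => if x ≠ noi ∧ (posDict fila).contains x
                    then okIns (posDict fila) noi (Int.ofNat i) (PySem.Dict.mk enemics) (PySem.Dict.mk amics) x
                    else true)) with
    | none =>
      simp only [Option.map_none]
      exact foldl_bind_none rest _ (fun x => rfl)
    | some i =>
      simp only [Option.map_some]
      have hqi := List.find?_some hfind
      have hii : i ≤ fila.length := Nat.lt_succ_iff.mp (List.mem_range.mp (List.mem_of_find?_eq_some hfind))
      have hvalnew : validar_fila (fila.take i ++ noi :: fila.drop i) (PySem.Dict.mk enemics) (PySem.Dict.mk amics) = true := by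
        rw [cand_eq fila enemics amics noi i hii hval hPn]
        exact hqi
      exact ih (fila.take i ++ noi :: fila.drop i) (fun v hv h => hP v (by simp [hv]) h) hvalnew

-- ===== VERDICT (by name: the statement is the Claim_ definition above) =====
theorem trobar_fila_spec : Claim_equal_trobar_fila := by
  intro nois enemics amics _ hPre
  unfold Spec_trobar_fila trobar_fila trobar_fila_alt
  have := go_eq enemics amics nois []
    (by intro v hv; exact hPre v hv)
    (by simp [validar_fila])
  simpa using this
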